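-- pv_equiv track=rewrite | github.com/edgecdec/SleeperLiveDraftRankingsV2 | src/backend/rankings/SimpleRankingsManager.py | _find_sleeper_match
-- ===== SOURCE A (Python) =====
-- from typing import Dict, Optional, List, Any
--
-- def _find_sleeper_match(player_name: str, sleeper_players: Dict) -> Optional[Dict]:
--     """
--     Find matching Sleeper player by name
--
--     Args:
--         player_name: Player name from rankings
--         sleeper_players: Dictionary of Sleeper players
--
--     Returns:
--         Matching Sleeper player data or None
--     """
--     if not player_name or not sleeper_players:
--         return None
--
--     player_name_clean = player_name.upper().strip()
--
--     # Try exact matches first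
--     for player_id, player_data in sleeper_players.items():
--         if not player_data:
--             continue
--
--         first_name = player_data.get('first_name', '').upper()
--         last_name = player_data.get('last_name', '').upper()
--         full_name = f"{first_name} {last_name}".strip()
--
--         if full_name == player_name_clean:
--             return {**player_data, 'id': player_id}
--
--     # Try partial matches
--     for player_id, player_data in sleeper_players.items():
--         if not player_data:
--             continue
--
--         first_name = player_data.get('first_name', '').upper()
--         last_name = player_data.get('last_name', '').upper()
--
--         # Check if last name matches and first name starts with same letter
--         if (last_name and last_name in player_name_clean and
--             first_name and len(first_name) > 0 and len(player_name_clean) > 0 and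
--             first_name[0] == player_name_clean[0]):
--             return {**player_data, 'id': player_id}
--
--     return None
-- ===== SOURCE B (Python) =====
-- def _find_sleeper_match(player_name, sleeper_players):
--     """Materialize one table of (exact?, partial?, result) rows in a single
--     preprocessing pass, then answer with two simple lookups on that table."""
--     if not player_name or not sleeper_players:
--         return None
--     clean = player_name.upper().strip()
--     rows = []
--     for player_id, player_data in sleeper_players.items():
--         if not player_data:
--             continue
--         fn = player_data.get('first_name', '').upper()
--         ln = player_data.get('last_name', '').upper()
--         exact = f"{fn} {ln}".strip() == clean
--         partial = bool(ln and ln in clean and fn and clean and fn[0] == clean[0])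
--         rows.append((exact, partial, {**player_data, 'id': player_id}))
--     hit = next((r for e, _, r in rows if e), None)
--     if hit is not None:
--         return hit
--     return next((r for _, p, r in rows if p), None)
-- ===== Notes on version B (the rewrite author's own statement) =====
-- stated objective: alternative
-- what changed: Instead of A's two raw scans of the dict, B precomputes one table of (exact-match?, partial-match?, merged-result) rows and then answers with two simple lookups over that precomputed table.
import Mathlib
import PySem

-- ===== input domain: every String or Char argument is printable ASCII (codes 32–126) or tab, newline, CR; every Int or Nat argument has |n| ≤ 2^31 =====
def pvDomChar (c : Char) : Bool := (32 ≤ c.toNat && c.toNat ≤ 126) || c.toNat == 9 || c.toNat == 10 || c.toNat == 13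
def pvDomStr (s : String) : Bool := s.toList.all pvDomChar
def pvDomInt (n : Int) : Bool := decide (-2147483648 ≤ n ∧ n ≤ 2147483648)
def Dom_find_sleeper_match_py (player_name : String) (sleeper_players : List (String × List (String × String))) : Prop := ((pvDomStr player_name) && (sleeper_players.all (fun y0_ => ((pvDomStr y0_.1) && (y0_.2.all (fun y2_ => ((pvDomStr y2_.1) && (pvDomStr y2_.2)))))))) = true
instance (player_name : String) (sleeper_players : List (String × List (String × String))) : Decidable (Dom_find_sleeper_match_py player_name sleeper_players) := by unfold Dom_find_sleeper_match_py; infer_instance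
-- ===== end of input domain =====

-- B replaces A's two raw scans with one preprocessing pass building a table of
-- (exact?, partial?, result) rows followed by two lookups; same return value.

-- ===== PORT A =====

def pvFirst (pd : List (String × String)) : List Char :=
  PySem.Chars.upper ((PySem.Dict.getD (PySem.Dict.mk pd) "first_name" "").toList)

def pvLast (pd : List (String × String)) : List Char :=
  PySem.Chars.upper ((PySem.Dict.getD (PySem.Dict.mk pd) "last_name" "").toList)

def pvOut (pid : String) (pd : List (String × String)) : List (String × String) :=
  (PySem.Dict.insert (PySem.Dict.mk pd) "id" pid).items

-- first loop of A: exact match on the stripped "first last" string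
def pvExactLoop (clean : List Char) :
    List (String × List (String × String)) → Option (List (String × String))
  | [] => none
  | (pid, pd) :: rest =>
    if pd = [] then pvExactLoop clean rest
    else
      if PySem.Chars.strip (pvFirst pd ++ ' ' :: pvLast pd) = clean then
        some (pvOut pid pd)
      else pvExactLoop clean rest

-- second loop of A (the condition short-circuits, so head? is safe as in Python)
def pvPartialLoop (clean : List Char) :
    List (String × List (String × String)) → Option (List (String × String))
  | [] => none
  | (pid, pd) :: rest =>
    if pd = [] then pvPartialLoop clean rest
    else
      if pvLast pd ≠ [] ∧ PySem.Chars.isIn (pvLast pd) clean = true ∧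
         pvFirst pd ≠ [] ∧ clean ≠ [] ∧ (pvFirst pd).head? = clean.head? then
        some (pvOut pid pd)
      else pvPartialLoop clean rest

def find_sleeper_match_py (player_name : String) (sleeper_players : List (String × List (String × String))) : Option (List (String × String)) :=
  if player_name = "" ∨ sleeper_players = [] then none
  else
    let clean := PySem.Chars.strip (PySem.Chars.upper player_name.toList)
    match pvExactLoop clean sleeper_players with
    | some r => some r
    | none => pvPartialLoop clean sleeper_players

-- ===== PORT B =====

-- one table row: (exact?, partial?, merged result), per Source B's preprocessing pass
def pvRow (clean : List Char) (p : String × List (String × String)) :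
    Bool × Bool × List (String × String) :=
  let fn := PySem.Chars.upper ((PySem.Dict.getD (PySem.Dict.mk p.2) "first_name" "").toList)
  let ln := PySem.Chars.upper ((PySem.Dict.getD (PySem.Dict.mk p.2) "last_name" "").toList)
  (decide (PySem.Chars.strip (fn ++ ' ' :: ln) = clean),
   decide (ln ≠ []) && PySem.Chars.isIn ln clean && decide (fn ≠ []) &&
     decide (clean ≠ []) && decide (fn.head? = clean.head?),
   (PySem.Dict.insert (PySem.Dict.mk p.2) "id" p.1).items)

def find_sleeper_match_py_alt (player_name : String) (sleeper_players : List (String × List (String × String))) : Option (List (String × String)) :=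
  if player_name = "" ∨ sleeper_players = [] then none
  else
    let clean := PySem.Chars.strip (PySem.Chars.upper player_name.toList)
    let rows := (sleeper_players.filter (fun p => !p.2.isEmpty)).map (pvRow clean)
    match rows.find? (fun r => r.1) with
    | some r => some r.2.2
    | none => (rows.find? (fun r => r.2.1)).map (fun r => r.2.2)

-- ===== PRECONDITION & SPEC =====
def Spec_find_sleeper_match_py (player_name : String) (sleeper_players : List (String × List (String × String))) (out : Option (List (String × String))) : Prop := out = find_sleeper_match_py_alt player_name sleeper_players
instance (player_name : String) (sleeper_players : List (String × List (String × String))) (out : Option (List (String × String))) : Decidable (Spec_find_sleeper_match_py player_name sleeper_players out) := by unfold Spec_find_sleeper_match_py; infer_instance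

-- ===== CLAIM =====
def Claim_equal_find_sleeper_match_py : Prop := ∀ (player_name : String) (sleeper_players : List (String × List (String × String))), Dom_find_sleeper_match_py player_name sleeper_players → Spec_find_sleeper_match_py player_name sleeper_players (find_sleeper_match_py player_name sleeper_players)

-- ===== LEMMAS AND PROOFS =====

-- rfl bridges from pvRow's components to A's helper expressions
theorem pvRow_fst (clean : List Char) (pid : String) (pd : List (String × String)) :
    (pvRow clean (pid, pd)).1 =
      decide (PySem.Chars.strip (pvFirst pd ++ ' ' :: pvLast pd) = clean) := rfl

theorem pvRow_partial (clean : List Char) (pid : String) (pd : List (String × String)) :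
    (pvRow clean (pid, pd)).2.1 =
      (decide (pvLast pd ≠ []) && PySem.Chars.isIn (pvLast pd) clean &&
       decide (pvFirst pd ≠ []) && decide (clean ≠ []) &&
       decide ((pvFirst pd).head? = clean.head?)) := rfl

theorem pvRow_out (clean : List Char) (pid : String) (pd : List (String × String)) :
    (pvRow clean (pid, pd)).2.2 = pvOut pid pd := rfl

-- B's first lookup on the row table is exactly A's first loop
theorem rows_exact (clean : List Char) (l : List (String × List (String × String))) :
    (((l.filter (fun p => !p.2.isEmpty)).map (pvRow clean)).find? (fun r => r.1)).map
        (fun r => r.2.2) = pvExactLoop clean l := by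
  induction l with
  | nil => simp [pvExactLoop]
  | cons hd rest ih =>
    obtain ⟨pid, pd⟩ := hd
    rw [List.filter_cons]
    by_cases hpd : pd = []
    · rw [if_neg (by simp [hpd])]
      simp only [pvExactLoop, if_pos hpd]
      exact ih
    · rw [if_pos (by simp [List.isEmpty_eq_false_iff, hpd]), List.map_cons]
      by_cases hex : PySem.Chars.strip (pvFirst pd ++ ' ' :: pvLast pd) = clean
      · rw [List.find?_cons_of_pos (by rw [pvRow_fst]; exact decide_eq_true hex)]
        simp only [pvExactLoop, if_neg hpd, if_pos hex, Option.map_some, pvRow_out]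
      · rw [List.find?_cons_of_neg (by rw [pvRow_fst]; simpa using hex)]
        simp only [pvExactLoop, if_neg hpd, if_neg hex]
        exact ih

-- B's second lookup on the row table is exactly A's second loop
theorem rows_partial (clean : List Char) (l : List (String × List (String × String))) :
    (((l.filter (fun p => !p.2.isEmpty)).map (pvRow clean)).find? (fun r => r.2.1)).map
        (fun r => r.2.2) = pvPartialLoop clean l := by
  induction l with
  | nil => simp [pvPartialLoop]
  | cons hd rest ih =>
    obtain ⟨pid, pd⟩ := hd
    rw [List.filter_cons]
    by_cases hpd : pd = []
    · rw [if_neg (by simp [hpd])]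
      simp only [pvPartialLoop, if_pos hpd]
      exact ih
    · rw [if_pos (by simp [List.isEmpty_eq_false_iff, hpd]), List.map_cons]
      by_cases hc : pvLast pd ≠ [] ∧ PySem.Chars.isIn (pvLast pd) clean = true ∧
          pvFirst pd ≠ [] ∧ clean ≠ [] ∧ (pvFirst pd).head? = clean.head?
      · rw [List.find?_cons_of_pos (by rw [pvRow_partial]; simpa [and_assoc] using hc)]
        simp only [pvPartialLoop, if_neg hpd, if_pos hc, Option.map_some, pvRow_out]
      · rw [List.find?_cons_of_neg (by rw [pvRow_partial]; simpa [and_assoc] using hc)]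
        simp only [pvPartialLoop, if_neg hpd, if_neg hc]
        exact ih

-- ===== VERDICT =====
theorem find_sleeper_match_py_spec : Claim_equal_find_sleeper_match_py := by
  intro player_name sleeper_players _
  unfold Spec_find_sleeper_match_py find_sleeper_match_py find_sleeper_match_py_alt
  by_cases hguard : player_name = "" ∨ sleeper_players = []
  · simp [hguard]
  · simp only [if_neg hguard]
    rw [← rows_exact, ← rows_partial]
    cases ((sleeper_players.filter (fun p => !p.2.isEmpty)).map
        (pvRow (PySem.Chars.strip (PySem.Chars.upper player_name.toList)))).find?
        (fun r => r.1) <;> simp
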